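-- pv_equiv track=rewrite | github.com/Tana-Tana/Python---PTIT | PY01011.py | CheckSTN
-- ===== SOURCE A (Python) =====
-- def CheckSTN(number1):
--     number = list(number1)
--     l = 0
--     r = len(number)-1
--     while l <= r:
--         if number[l] != number[r]: return False
--         if (number[l] != "0") and (number[l] != "2") and(number[l] != "4") and(number[l] != "6") and(number[l] != "8"): return False
--         if (number[r] != "0") and (number[r] != "2") and(number[r] != "4") and(number[r] != "6") and(number[r] != "8"): return False
--         l+=1
--         r-=1
--     if len(number) % 2 == 1: return False
--     return True
-- ===== SOURCE B (Python) =====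
-- def CheckSTN(number1):
--     number = list(number1)
--     return (len(number) % 2 == 0
--             and number == list(reversed(number))
--             and all(c in ('0', '2', '4', '6', '8') for c in number))
-- ===== Notes on version B (the rewrite author's own statement) =====
-- stated objective: simpler
-- what changed: A's single fused two-pointer loop (palindrome + even-digit checks interleaved with early returns) is replaced by a conjunction of three independent checks: length parity, equality with the reversed copy, and a membership scan for even digits.
import Mathlib
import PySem

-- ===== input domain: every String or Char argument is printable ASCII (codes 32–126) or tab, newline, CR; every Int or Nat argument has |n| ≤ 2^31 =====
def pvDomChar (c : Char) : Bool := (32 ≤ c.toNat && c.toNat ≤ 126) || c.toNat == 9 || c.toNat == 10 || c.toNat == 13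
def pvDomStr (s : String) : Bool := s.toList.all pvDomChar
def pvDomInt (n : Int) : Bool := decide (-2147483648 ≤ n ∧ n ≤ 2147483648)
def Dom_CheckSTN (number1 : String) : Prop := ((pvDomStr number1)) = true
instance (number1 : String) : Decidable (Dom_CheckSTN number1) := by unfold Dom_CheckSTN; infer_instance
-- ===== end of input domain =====

-- B replaces A's fused two-pointer loop by three independent checks (parity, reversed-copy equality, even-digit scan); objective: simpler.


-- ===== PORT A =====
-- the while loop of A; the final parity check is the loop's exit value
def pvALoop (xs : List Char) (l r : Int) : Bool :=
  if _h : l ≤ r then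
    match PySem.List.pyGet? xs l, PySem.List.pyGet? xs r with
    | some a, some b =>
      if a ≠ b then false
      else if a ≠ '0' ∧ a ≠ '2' ∧ a ≠ '4' ∧ a ≠ '6' ∧ a ≠ '8' then false
      else if b ≠ '0' ∧ b ≠ '2' ∧ b ≠ '4' ∧ b ≠ '6' ∧ b ≠ '8' then false
      else pvALoop xs (l + 1) (r - 1)
    | _, _ => false   -- IndexError: unreachable, indices stay in range
  else if xs.length % 2 == 1 then false else true
termination_by (r + 1 - l).toNat
decreasing_by omega

def CheckSTN (number1 : String) : Bool :=
  let number := number1.toList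
  pvALoop number 0 ((number.length : Int) - 1)

-- ===== PORT B =====
def pvEvenDigit (c : Char) : Bool := c ∈ ['0', '2', '4', '6', '8']

def CheckSTN_alt (number1 : String) : Bool :=
  let number := number1.toList
  decide (number.length % 2 = 0) && (number == number.reverse) && number.all pvEvenDigit

-- ===== PRECONDITION & SPEC =====
def Spec_CheckSTN (number1 : String) (out : Bool) : Prop := out = CheckSTN_alt number1
instance (number1 : String) (out : Bool) : Decidable (Spec_CheckSTN number1 out) := by unfold Spec_CheckSTN; infer_instance

-- ===== CLAIM (what is proved, stated in full; the proofs are below) =====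
def Claim_equal_CheckSTN : Prop := ∀ (number1 : String), Dom_CheckSTN number1 → Spec_CheckSTN number1 (CheckSTN number1)

-- ===== LEMMAS AND PROOFS =====

lemma pvALoop_base (xs : List Char) (l r : Int) (h : ¬ l ≤ r) :
    pvALoop xs l r = (if xs.length % 2 == 1 then false else true) := by
  rw [pvALoop, dif_neg h]

lemma evenDigit_iff (c : Char) :
    (¬(c ≠ '0' ∧ c ≠ '2' ∧ c ≠ '4' ∧ c ≠ '6' ∧ c ≠ '8')) ↔ pvEvenDigit c = true := by
  simp [pvEvenDigit]
  tauto

-- the invariant of A's loop: it returns true iff every index in [l,r] mirrors and holds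
-- an even digit, and the length is even
lemma pvALoop_iff (xs : List Char) :
    ∀ (n l r : Nat), r + 1 - l = n → r < xs.length →
      (pvALoop xs (l : Int) (r : Int) = true ↔
        ((∀ i : Nat, l ≤ i → i ≤ r → xs.getD i ' ' = xs.getD (l + r - i) ' ' ∧
            pvEvenDigit (xs.getD i ' ') = true) ∧ xs.length % 2 = 0)) := by
  intro n
  induction n using Nat.strong_induction_on with
  | _ n ih =>
    intro l r hn hr
    by_cases hlr : l ≤ r
    · have hli : ((l : Int)) ≤ (r : Int) := by exact_mod_cast hlr
      have hlt : l < xs.length := lt_of_le_of_lt hlr hr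
      rw [pvALoop, dif_pos hli, PySem.List.pyGet?_natCast, PySem.List.pyGet?_natCast,
        List.getElem?_eq_getElem hlt, List.getElem?_eq_getElem hr]
      dsimp only
      have gl : xs.getD l ' ' = xs[l] := List.getD_eq_getElem xs ' ' hlt
      have gr : xs.getD r ' ' = xs[r] := List.getD_eq_getElem xs ' ' hr
      have hml : l + r - l = r := by omega
      by_cases heq : xs[l] = xs[r]
      · rw [if_neg (by simpa using heq)]
        by_cases hev1 : pvEvenDigit xs[l] = true
        · rw [if_neg ((evenDigit_iff _).mpr hev1)]
          have hev2 : pvEvenDigit xs[r] = true := heq ▸ hev1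
          rw [if_neg ((evenDigit_iff _).mpr hev2)]
          by_cases hleqr : l = r
          · subst hleqr
            rw [pvALoop_base xs _ _ (by omega)]
            by_cases hp : xs.length % 2 = 0
            · have hc : (xs.length % 2 == 1) = false := by simp [hp]
              simp only [hc, Bool.false_eq_true, if_false, true_iff]
              refine ⟨fun i h1 h2 => ?_, hp⟩
              have hil : i = l := le_antisymm h2 h1
              subst hil
              rw [hml]
              exact ⟨rfl, by rw [gl]; exact hev1⟩
            · have hc : (xs.length % 2 == 1) = true := by
                have : xs.length % 2 = 1 := by omega
                simp [this]
              simp only [hc, if_true, Bool.false_eq_true, false_iff]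
              rintro ⟨-, hp'⟩
              exact hp hp'
          · have hlt2 : l < r := lt_of_le_of_ne hlr hleqr
            have h1 : (l : Int) + 1 = ((l + 1 : Nat) : Int) := by push_cast; ring
            have h2 : (r : Int) - 1 = ((r - 1 : Nat) : Int) := by omega
            rw [h1, h2, ih (r - 1 + 1 - (l + 1)) (by omega) (l + 1) (r - 1) rfl (by omega)]
            have hidx : ∀ i : Nat, l + 1 + (r - 1) - i = l + r - i := by intro i; omega
            constructor
            · rintro ⟨hm, hp⟩
              refine ⟨fun i hi1 hi2 => ?_, hp⟩
              rcases eq_or_lt_of_le hi1 with hil | hil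
              · subst hil
                rw [hml, gl, gr]
                exact ⟨heq, hev1⟩
              · rcases eq_or_lt_of_le hi2 with hir | hir
                · subst hir
                  rw [show l + i - i = l by omega, gl, gr]
                  exact ⟨heq.symm, hev2⟩
                · have := hm i (by omega) (by omega)
                  rwa [hidx] at this
            · rintro ⟨hm, hp⟩
              refine ⟨fun i hi1 hi2 => ?_, hp⟩
              rw [hidx]
              exact hm i (by omega) (by omega)
        · have hP : xs[l] ≠ '0' ∧ xs[l] ≠ '2' ∧ xs[l] ≠ '4' ∧ xs[l] ≠ '6' ∧ xs[l] ≠ '8' := by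
            by_contra hc
            exact hev1 ((evenDigit_iff _).mp hc)
          rw [if_pos hP]
          simp only [Bool.false_eq_true, false_iff]
          rintro ⟨hm, -⟩
          have := (hm l le_rfl hlr).2
          rw [gl] at this
          exact hev1 this
      · rw [if_pos heq]
        simp only [Bool.false_eq_true, false_iff]
        rintro ⟨hm, -⟩
        have := (hm l le_rfl hlr).1
        rw [hml, gl, gr] at this
        exact heq this
    · have hli : ¬ ((l : Int)) ≤ (r : Int) := by exact_mod_cast hlr
      rw [pvALoop_base xs _ _ hli]
      constructor
      · intro h
        refine ⟨fun i h1 h2 => absurd (le_trans h1 h2) (by omega), ?_⟩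
        by_contra hp
        have h1 : xs.length % 2 = 1 := Nat.mod_two_ne_zero.mp hp
        simp [h1] at h
      · rintro ⟨-, hp⟩
        simp [hp]

-- palindrome ↔ mirrored indices
lemma reverse_iff (xs : List Char) (h : xs ≠ []) :
    (xs = xs.reverse) ↔
      (∀ i : Nat, i ≤ xs.length - 1 → xs.getD i ' ' = xs.getD (xs.length - 1 - i) ' ') := by
  have hlen : 0 < xs.length := List.length_pos_iff.mpr h
  constructor
  · intro he i hi
    have hi' : i < xs.length := by omega
    conv_lhs => rw [he]
    rw [List.getD_eq_getElem _ _ (by simpa using hi'), List.getD_eq_getElem _ _ (by omega)]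
    rw [List.getElem_reverse]
  · intro hp
    apply List.ext_getElem (by simp)
    intro i h1 h2
    have := hp (xs.length - 1 - i) (by omega)
    rw [List.getD_eq_getElem _ _ (by omega), List.getD_eq_getElem _ _ (by omega)] at this
    rw [List.getElem_reverse, this]
    congr 1
    omega

-- even-digit scan ↔ pointwise
lemma all_iff (xs : List Char) :
    (xs.all pvEvenDigit = true) ↔
      (∀ i : Nat, i < xs.length → pvEvenDigit (xs.getD i ' ') = true) := by
  rw [List.all_eq_true]
  constructor
  · intro h i hi
    rw [List.getD_eq_getElem _ _ hi]
    exact h _ (List.getElem_mem hi)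
  · intro h c hc
    obtain ⟨i, hi, rfl⟩ := List.mem_iff_getElem.mp hc
    have := h i hi
    rwa [List.getD_eq_getElem _ _ hi] at this

-- ===== VERDICT (by name: the statement is the Claim_ definition above) =====
theorem CheckSTN_spec : Claim_equal_CheckSTN := by
  intro number1 _
  unfold Spec_CheckSTN CheckSTN CheckSTN_alt
  simp only []
  set xs := number1.toList with hxs
  rcases eq_or_ne xs [] with he | he
  · rw [he, pvALoop_base _ _ _ (by norm_num)]
    simp
  · have hlen : 0 < xs.length := List.length_pos_iff.mpr he
    have hcast : ((xs.length : Int) - 1) = ((xs.length - 1 : Nat) : Int) := by omega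
    rw [hcast]
    have hiff := pvALoop_iff xs (xs.length - 1 + 1 - 0) 0 (xs.length - 1) rfl (by omega)
    simp only [Nat.cast_zero, Nat.zero_add] at hiff
    rw [Bool.eq_iff_iff, hiff]
    simp only [Bool.and_eq_true, decide_eq_true_eq, beq_iff_eq]
    rw [reverse_iff xs he, all_iff xs]
    constructor
    · rintro ⟨hm, hp⟩
      refine ⟨⟨hp, fun i hi => (hm i (Nat.zero_le _) hi).1⟩, fun i hi => ?_⟩
      exact (hm i (Nat.zero_le _) (by omega)).2
    · rintro ⟨⟨hp, hrev⟩, hev⟩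
      exact ⟨fun i _ h2 => ⟨hrev i h2, hev i (by omega)⟩, hp⟩
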